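-- pv_equiv track=rewrite | github.com/AdityaSinghh7/resume_tailor | backend/api/repository_processing.py | chunk_text_generic
-- ===== SOURCE A (Python) =====
-- def chunk_text_generic(text: str, chunk_size: int = 2000):
--     """Chunk text by paragraphs or fixed size."""
--     paragraphs = [p for p in text.split('\n\n') if p.strip()]
--     chunks = []
--     for para in paragraphs:
--         if len(para) > chunk_size:
--             # further split
--             for i in range(0, len(para), chunk_size):
--                 chunks.append(para[i:i+chunk_size])
--         else:
--             chunks.append(para)
--     return chunks
-- ===== SOURCE B (Python) =====
-- def chunk_text_generic(text: str, chunk_size: int = 2000):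
--     """Chunk text by paragraphs or fixed size."""
--     chunks = []
--     for para in text.split('\n\n'):
--         if not para.strip():
--             continue
--         buf = ''
--         for ch in para:
--             buf += ch
--             if len(buf) == chunk_size:
--                 chunks.append(buf)
--                 buf = ''
--         if buf:
--             chunks.append(buf)
--     return chunks
-- ===== Notes on version B (the rewrite author's own statement) =====
-- stated objective: alternative
-- what changed: B drops the filter-then-slice-by-index structure: it streams each paragraph character by character into a buffer that is appended to the output and reset whenever it reaches chunk_size, with the leftover buffer flushed at the end.
-- intended difference: For chunk_size < 0 on text containing a non-blank paragraph, A returns [] because range(0, len(para), negative) is empty so every paragraph is silently dropped, while B returns each non-blank paragraph whole; preserving the text is the intended behaviour for a meaningless chunk size. — e.g. on chunk_text_generic("ab", -1): A returns [], B returns ["ab"]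
import Mathlib
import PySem

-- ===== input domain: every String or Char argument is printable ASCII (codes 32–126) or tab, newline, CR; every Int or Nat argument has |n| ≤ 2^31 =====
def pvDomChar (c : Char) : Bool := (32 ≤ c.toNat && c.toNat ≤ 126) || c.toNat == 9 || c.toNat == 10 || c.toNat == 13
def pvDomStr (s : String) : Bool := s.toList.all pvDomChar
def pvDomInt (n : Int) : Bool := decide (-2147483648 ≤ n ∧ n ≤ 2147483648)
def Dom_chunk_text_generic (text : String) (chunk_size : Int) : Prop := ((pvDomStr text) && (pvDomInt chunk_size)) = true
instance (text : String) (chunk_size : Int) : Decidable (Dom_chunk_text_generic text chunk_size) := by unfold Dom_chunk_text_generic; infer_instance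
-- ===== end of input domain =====

-- B replaces A's filter-then-slice-by-index structure with a per-character streaming buffer that
-- is flushed whenever it reaches chunk_size (objective: alternative algorithm, same cost).


-- ===== PORT A =====
-- paragraphs = [p for p in text.split('\n\n') if p.strip()]; then for each para: if it is longer
-- than chunk_size, append its fixed-size slices, else append it whole (strings as List Char,
-- mapped back to String at the end).
def chunk_text_generic (text : String) (chunk_size : Int) : List String :=
  let paragraphs := (PySem.Chars.splitOn text.toList ['\n', '\n']).filter
    (fun p => !((PySem.Chars.strip p).isEmpty))
  (paragraphs.foldl (fun chunks para =>
    if chunk_size < PySem.Chars.len para then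
      (PySem.List.pyRange 0 (PySem.Chars.len para) chunk_size).foldl
        (fun chunks i => chunks ++ [PySem.Chars.slice para (some i) (some (i + chunk_size))]) chunks
    else chunks ++ [para]) []).map String.ofList

-- ===== PORT B =====
-- one loop over text.split('\n\n'): skip blank pieces; stream a kept paragraph character by
-- character into a buffer, flushing the buffer into the output whenever it reaches chunk_size,
-- and flush the non-empty leftover at the end.
def chunk_text_generic_alt (text : String) (chunk_size : Int) : List String :=
  ((PySem.Chars.splitOn text.toList ['\n', '\n']).foldl (fun chunks para =>
    if (PySem.Chars.strip para).isEmpty then chunks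
    else
      let st := para.foldl (fun (st : List (List Char) × List Char) ch =>
        let buf := st.2 ++ [ch]
        if PySem.Chars.len buf == chunk_size then (st.1 ++ [buf], ([] : List Char))
        else (st.1, buf)) (chunks, ([] : List Char))
      if st.2.isEmpty then st.1 else st.1 ++ [st.2]) []).map String.ofList

-- ===== PRECONDITION & SPEC =====
-- Pre_ excludes exactly the inputs where Python A raises: chunk_size = 0 together with a text
-- that has some non-blank paragraph (a kept paragraph reaches range(0, len, 0) → ValueError).
def Pre_chunk_text_generic (text : String) (chunk_size : Int) : Prop :=
  chunk_size ≠ 0 ∨ ∀ p ∈ PySem.Chars.splitOn text.toList ['\n', '\n'], (PySem.Chars.strip p).isEmpty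
instance (text : String) (chunk_size : Int) : Decidable (Pre_chunk_text_generic text chunk_size) := by
  unfold Pre_chunk_text_generic; infer_instance
def pvWitness_chunk_text_generic : String × Int := ("hello\n\nworld", 4)

-- For chunk_size < 0 on text with a non-blank paragraph, A returns [] (range(0, len, negative)
-- is empty, so every kept paragraph is silently dropped) while B returns each non-blank paragraph
-- whole; preserving the text is the intended behaviour for a meaningless chunk size.
def D_chunk_text_generic (text : String) (chunk_size : Int) : Prop :=
  chunk_size < 0 ∧ ∃ p ∈ PySem.Chars.splitOn text.toList ['\n', '\n'], ¬ (PySem.Chars.strip p).isEmpty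
instance (text : String) (chunk_size : Int) : Decidable (D_chunk_text_generic text chunk_size) := by
  unfold D_chunk_text_generic; infer_instance

def Spec_chunk_text_generic (text : String) (chunk_size : Int) (out : List String) : Prop :=
  ¬ D_chunk_text_generic text chunk_size → out = chunk_text_generic_alt text chunk_size
instance (text : String) (chunk_size : Int) (out : List String) : Decidable (Spec_chunk_text_generic text chunk_size out) := by
  unfold Spec_chunk_text_generic; infer_instance

def pvDiffWitness_chunk_text_generic : String × Int := ("ab", -1)
def pvDiffWitnessOut_chunk_text_generic : (List String) × (List String) := ([], ["ab"])

-- ===== CLAIM (what is proved, stated in full; the proofs are below) =====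
def Claim_unchanged_chunk_text_generic : Prop := ∀ (text : String) (chunk_size : Int), Dom_chunk_text_generic text chunk_size → Pre_chunk_text_generic text chunk_size → Spec_chunk_text_generic text chunk_size (chunk_text_generic text chunk_size)
def Claim_changed_chunk_text_generic : Prop := Dom_chunk_text_generic (pvDiffWitness_chunk_text_generic.1) (pvDiffWitness_chunk_text_generic.2) ∧ Pre_chunk_text_generic (pvDiffWitness_chunk_text_generic.1) (pvDiffWitness_chunk_text_generic.2) ∧ D_chunk_text_generic (pvDiffWitness_chunk_text_generic.1) (pvDiffWitness_chunk_text_generic.2) ∧ chunk_text_generic (pvDiffWitness_chunk_text_generic.1) (pvDiffWitness_chunk_text_generic.2) = pvDiffWitnessOut_chunk_text_generic.1 ∧ chunk_text_generic_alt (pvDiffWitness_chunk_text_generic.1) (pvDiffWitness_chunk_text_generic.2) = pvDiffWitnessOut_chunk_text_generic.2 ∧ pvDiffWitnessOut_chunk_text_generic.1 ≠ pvDiffWitnessOut_chunk_text_generic.2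

-- ===== LEMMAS AND PROOFS =====

-- Proof-only spec of the chunk list: cut l into pieces of length k+1, last piece possibly shorter.
def pvChunks (k : Nat) (l : List Char) : List (List Char) :=
  if l.length ≤ k + 1 then [l]
  else l.take (k + 1) :: pvChunks k (l.drop (k + 1))
termination_by l.length
decreasing_by simp; omega

theorem pv_strip_ne_nil {para : List Char} (h : ¬ (PySem.Chars.strip para).isEmpty = true) :
    para ≠ [] := by
  intro hn; subst hn
  simp [PySem.Chars.strip, PySem.Chars.lstrip, PySem.Chars.rstrip] at h

theorem pv_pvChunks_append (k : Nat) (b rest : List Char) (hb : b.length = k + 1) :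
    pvChunks k (b ++ rest) = if rest.isEmpty then [b] else b :: pvChunks k rest := by
  by_cases hre : rest = []
  · subst hre
    simp only [List.append_nil, List.isEmpty_nil, if_pos]
    rw [pvChunks, if_pos (by omega)]
  · have hrl : 0 < rest.length := List.length_pos_iff.mpr hre
    rw [pvChunks, if_neg (by simp [hb]; omega),
      List.take_left' hb, List.drop_left' hb, if_neg (by simpa using hre)]

-- range(0, L, cs) for 0 < cs < L starts at 0 and continues as the shifted range of L - cs.
theorem pv_pyRange_pos_cons (cs L : Int) (h1 : 0 < cs) (h2 : cs < L) :
    PySem.List.pyRange 0 L cs = 0 :: (PySem.List.pyRange 0 (L - cs) cs).map (· + cs) := by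
  rw [PySem.List.pyRange_of_pos 0 L h1, PySem.List.pyRange_of_pos 0 (L - cs) h1]
  rw [if_pos (by omega : (0:Int) < L), if_pos (by omega : (0:Int) < L - cs)]
  have hN : ((L - 0 + cs - 1) / cs).toNat = ((L - cs - 0 + cs - 1) / cs).toNat + 1 := by
    have heq : L - 0 + cs - 1 = (L - cs - 0 + cs - 1) + cs * 1 := by ring
    rw [heq, Int.add_mul_ediv_left _ 1 (by omega : cs ≠ 0)]
    have hnn : 0 ≤ (L - cs - 0 + cs - 1) / cs := Int.ediv_nonneg (by omega) (by omega)
    omega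
  rw [hN, List.range_succ_eq_map]
  simp only [List.map_cons, List.map_map]
  congr 1
  · simp
  · apply List.map_congr_left
    intro k _
    simp only [Function.comp_apply]
    push_cast
    ring

-- A's slice map over range(0, len(para), cs) is exactly the chunk list (cs ≥ 1).
theorem pv_A_map (n : Nat) : ∀ (cs : Int), 1 ≤ cs → ∀ para : List Char, para.length = n → para ≠ [] →
    (PySem.List.pyRange 0 (para.length : Int) cs).map
      (fun i => PySem.List.slice para (some i) (some (i + cs))) = pvChunks (cs.toNat - 1) para := by
  induction n using Nat.strong_induction_on with
  | _ n ih =>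
    intro cs hcs para hlen hne
    have hk : cs.toNat - 1 + 1 = cs.toNat := by omega
    have hL1 : 1 ≤ (para.length : Int) := by
      have := List.length_pos_iff.mpr hne; omega
    by_cases hle : (para.length : Int) ≤ cs
    · -- one chunk: range is [0] and the slice is the whole paragraph
      have hr : PySem.List.pyRange 0 (para.length : Int) cs = [0] := by
        rw [PySem.List.pyRange_of_pos 0 _ (by omega), if_pos (by omega : (0:Int) < (para.length : Int))]
        have h2 : (((para.length : Int) - 0 + cs - 1) / cs).toNat = 1 := by
          have h1 : ((para.length : Int) - 0 + cs - 1) / cs = 1 := by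
            have heq : (para.length : Int) - 0 + cs - 1 = ((para.length : Int) - 1) + cs * 1 := by ring
            rw [heq, Int.add_mul_ediv_left _ 1 (by omega : cs ≠ 0),
              Int.ediv_eq_zero_of_lt (by omega) (by omega)]
            omega
          omega
        rw [h2]; simp
      rw [hr, pvChunks, if_pos (by omega : para.length ≤ cs.toNat - 1 + 1)]
      simp only [List.map_cons, List.map_nil, zero_add]
      congr 1
      rw [show PySem.List.slice para (some 0) (some cs) = PySem.List.slice para none (some cs) by simp,
        PySem.List.slice_to para (by omega), List.take_of_length_le (by omega)]
    · -- head chunk, then recurse on the dropped paragraph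
      have hlt : cs < (para.length : Int) := by omega
      rw [pv_pyRange_pos_cons cs _ (by omega) hlt]
      simp only [List.map_cons, List.map_map]
      have hhead : PySem.List.slice para (some 0) (some (0 + cs)) = para.take cs.toNat := by
        rw [show (0 : Int) + cs = cs by ring,
          show PySem.List.slice para (some 0) (some cs) = PySem.List.slice para none (some cs) by simp,
          PySem.List.slice_to para (by omega)]
      have htail : ((PySem.List.pyRange 0 ((para.length : Int) - cs) cs).map
          ((fun i => PySem.List.slice para (some i) (some (i + cs))) ∘ (· + cs)))
          = (PySem.List.pyRange 0 ((para.length : Int) - cs) cs).map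
            (fun i => PySem.List.slice (para.drop cs.toNat) (some i) (some (i + cs))) := by
        apply List.map_congr_left
        intro i hi
        have h0i : 0 ≤ i := ((PySem.List.mem_pyRange_iff_of_pos (by omega) i).mp hi).1
        simp only [Function.comp]
        rw [PySem.List.slice_toNat para (by omega) (by omega),
          PySem.List.slice_toNat (para.drop cs.toNat) (by omega) (by omega),
          List.drop_drop]
        congr 1
        · omega
        · congr 1; omega
      rw [htail]
      have hdlen : (para.drop cs.toNat).length = n - cs.toNat := by simp [hlen]
      have hdne : para.drop cs.toNat ≠ [] := by
        have h0 : (para.drop cs.toNat).length ≠ 0 := by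
          rw [hdlen]; omega
        exact fun hnil => h0 (by rw [hnil]; rfl)
      have hcast : ((para.length : Int) - cs) = (((para.drop cs.toNat).length : Nat) : Int) := by
        rw [hdlen]; push_cast; omega
      have hrhs : pvChunks (cs.toNat - 1) para
          = para.take (cs.toNat - 1 + 1) :: pvChunks (cs.toNat - 1) (para.drop (cs.toNat - 1 + 1)) := by
        conv_lhs => rw [pvChunks]
        rw [if_neg (by omega : ¬ para.length ≤ cs.toNat - 1 + 1)]
      rw [hcast, ih (n - cs.toNat) (by omega) cs hcs _ hdlen hdne, hrhs, hk, hhead]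

-- B's per-character buffer fold flushes exactly the chunk list (cs ≥ 1).
theorem pv_B_fold (cs : Int) (hcs : 1 ≤ cs) :
    ∀ (l : List Char) (chunks : List (List Char)) (buf : List Char), buf.length < cs.toNat →
    (if (l.foldl (fun (st : List (List Char) × List Char) ch =>
          if PySem.Chars.len (st.2 ++ [ch]) == cs then (st.1 ++ [st.2 ++ [ch]], ([] : List Char))
          else (st.1, st.2 ++ [ch])) (chunks, buf)).2.isEmpty then
        (l.foldl (fun (st : List (List Char) × List Char) ch =>
          if PySem.Chars.len (st.2 ++ [ch]) == cs then (st.1 ++ [st.2 ++ [ch]], ([] : List Char))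
          else (st.1, st.2 ++ [ch])) (chunks, buf)).1
      else
        (l.foldl (fun (st : List (List Char) × List Char) ch =>
          if PySem.Chars.len (st.2 ++ [ch]) == cs then (st.1 ++ [st.2 ++ [ch]], ([] : List Char))
          else (st.1, st.2 ++ [ch])) (chunks, buf)).1
        ++ [(l.foldl (fun (st : List (List Char) × List Char) ch =>
          if PySem.Chars.len (st.2 ++ [ch]) == cs then (st.1 ++ [st.2 ++ [ch]], ([] : List Char))
          else (st.1, st.2 ++ [ch])) (chunks, buf)).2])
    = if (buf ++ l).isEmpty then chunks else chunks ++ pvChunks (cs.toNat - 1) (buf ++ l) := by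
  intro l
  induction l with
  | nil =>
    intro chunks buf hb
    by_cases hbe : buf = []
    · subst hbe; simp
    · simp only [List.foldl_nil, List.append_nil]
      rw [if_neg (by simpa using hbe), if_neg (by simpa using hbe)]
      rw [pvChunks, if_pos (by omega)]
  | cons ch rest ihr =>
    intro chunks buf hb
    simp only [List.foldl_cons]
    by_cases hflush : (PySem.Chars.len (buf ++ [ch]) == cs) = true
    · rw [if_pos hflush]
      have hlen : (buf ++ [ch]).length = cs.toNat - 1 + 1 := by
        have h1 := (beq_iff_eq).mp hflush
        rw [PySem.Chars.len_eq] at h1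
        omega
      have hih := ihr (chunks ++ [buf ++ [ch]]) [] (by simp; omega)
      simp only [List.nil_append] at hih
      rw [hih, List.append_cons buf ch rest, pv_pvChunks_append _ _ _ hlen]
      by_cases hre : rest = []
      · subst hre; simp
      · have h1 : rest.isEmpty = false := by simpa using hre
        have h2 : ((buf ++ [ch]) ++ rest).isEmpty = false := by simp
        rw [h1, h2]
        simp
    · rw [if_neg hflush]
      have hlt : (buf ++ [ch]).length < cs.toNat := by
        have h1 : PySem.Chars.len (buf ++ [ch]) ≠ cs := fun h => hflush ((beq_iff_eq).mpr h)
        rw [PySem.Chars.len_eq] at h1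
        have h2 : ((buf ++ [ch]).length : Int) ≠ cs := h1
        simp only [List.length_append, List.length_cons, List.length_nil] at h2 ⊢
        omega
      rw [ihr chunks (buf ++ [ch]) hlt, List.append_cons buf ch rest]

-- Per-paragraph agreement for cs ≥ 1: A's branch and B's buffer fold both append the chunk list.
theorem pv_step_eq (cs : Int) (hcs : 1 ≤ cs) (chunks : List (List Char)) (para : List Char) :
    (if (!((PySem.Chars.strip para).isEmpty)) = true then
      (if cs < PySem.Chars.len para then
        (PySem.List.pyRange 0 (PySem.Chars.len para) cs).foldl
          (fun c i => c ++ [PySem.Chars.slice para (some i) (some (i + cs))]) chunks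
      else chunks ++ [para])
    else chunks)
    = (if (PySem.Chars.strip para).isEmpty then chunks
      else if (para.foldl (fun (st : List (List Char) × List Char) ch =>
          if PySem.Chars.len (st.2 ++ [ch]) == cs then (st.1 ++ [st.2 ++ [ch]], ([] : List Char))
          else (st.1, st.2 ++ [ch])) (chunks, ([] : List Char))).2.isEmpty then
        (para.foldl (fun (st : List (List Char) × List Char) ch =>
          if PySem.Chars.len (st.2 ++ [ch]) == cs then (st.1 ++ [st.2 ++ [ch]], ([] : List Char))
          else (st.1, st.2 ++ [ch])) (chunks, ([] : List Char))).1
      else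
        (para.foldl (fun (st : List (List Char) × List Char) ch =>
          if PySem.Chars.len (st.2 ++ [ch]) == cs then (st.1 ++ [st.2 ++ [ch]], ([] : List Char))
          else (st.1, st.2 ++ [ch])) (chunks, ([] : List Char))).1
        ++ [(para.foldl (fun (st : List (List Char) × List Char) ch =>
          if PySem.Chars.len (st.2 ++ [ch]) == cs then (st.1 ++ [st.2 ++ [ch]], ([] : List Char))
          else (st.1, st.2 ++ [ch])) (chunks, ([] : List Char))).2]) := by
  by_cases he : (PySem.Chars.strip para).isEmpty
  · simp [he]
  · have hne : para ≠ [] := pv_strip_ne_nil he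
    have he' : (PySem.Chars.strip para).isEmpty = false := by simpa using he
    rw [if_pos (show (!(PySem.Chars.strip para).isEmpty) = true by simp [he']),
      if_neg (show ¬((PySem.Chars.strip para).isEmpty = true) by simp [he'])]
    have hB := pv_B_fold cs hcs para chunks [] (by simp; omega)
    simp only [List.nil_append] at hB
    rw [hB, if_neg (show ¬(para.isEmpty = true) by simpa using hne)]
    by_cases hl : cs < PySem.Chars.len para
    · rw [if_pos hl]
      simp only [PySem.Chars.slice_eq_listSlice, PySem.Chars.len_eq]
      rw [PySem.List.foldl_append_singleton_eq_map
        (fun i => PySem.List.slice para (some i) (some (i + cs))),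
        pv_A_map para.length cs hcs para rfl hne]
    · rw [if_neg hl]
      rw [PySem.Chars.len_eq] at hl
      congr 1
      rw [pvChunks, if_pos (by omega)]

-- If every piece is blank, A keeps no paragraph and B's fold never changes its accumulator.
theorem pv_blank_fold_A (l : List (List Char))
    (h : ∀ p ∈ l, (PySem.Chars.strip p).isEmpty) :
    l.filter (fun p => !((PySem.Chars.strip p).isEmpty)) = [] := by
  rw [List.filter_eq_nil_iff]
  intro p hp
  simp [h p hp]

theorem pv_blank_fold_B (cs : Int) (l : List (List Char)) (acc : List (List Char))
    (h : ∀ p ∈ l, (PySem.Chars.strip p).isEmpty) :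
    l.foldl (fun chunks para =>
      if (PySem.Chars.strip para).isEmpty then chunks
      else if (para.foldl (fun (st : List (List Char) × List Char) ch =>
          if PySem.Chars.len (st.2 ++ [ch]) == cs then (st.1 ++ [st.2 ++ [ch]], ([] : List Char))
          else (st.1, st.2 ++ [ch])) (chunks, ([] : List Char))).2.isEmpty then
        (para.foldl (fun (st : List (List Char) × List Char) ch =>
          if PySem.Chars.len (st.2 ++ [ch]) == cs then (st.1 ++ [st.2 ++ [ch]], ([] : List Char))
          else (st.1, st.2 ++ [ch])) (chunks, ([] : List Char))).1
      else
        (para.foldl (fun (st : List (List Char) × List Char) ch =>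
          if PySem.Chars.len (st.2 ++ [ch]) == cs then (st.1 ++ [st.2 ++ [ch]], ([] : List Char))
          else (st.1, st.2 ++ [ch])) (chunks, ([] : List Char))).1
        ++ [(para.foldl (fun (st : List (List Char) × List Char) ch =>
          if PySem.Chars.len (st.2 ++ [ch]) == cs then (st.1 ++ [st.2 ++ [ch]], ([] : List Char))
          else (st.1, st.2 ++ [ch])) (chunks, ([] : List Char))).2]) acc = acc := by
  induction l generalizing acc with
  | nil => rfl
  | cons p rest ihr =>
    simp only [List.foldl_cons, if_pos (h p (by simp))]
    exact ihr acc (fun q hq => h q (by simp [hq]))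

-- ===== VERDICT (by name: the statements are the Claim_ definitions above) =====
theorem chunk_text_generic_spec : Claim_unchanged_chunk_text_generic := by
  intro text cs _ hpre hnd
  simp only [chunk_text_generic, chunk_text_generic_alt]
  by_cases hall : ∀ p ∈ PySem.Chars.splitOn text.toList ['\n', '\n'], (PySem.Chars.strip p).isEmpty
  · rw [pv_blank_fold_A _ hall, pv_blank_fold_B cs _ [] hall]
    rfl
  · have hcs : 1 ≤ cs := by
      rcases hpre with h0 | h; swap
      · exact absurd h hall
      unfold D_chunk_text_generic at hnd
      push_neg at hall
      rcases hall with ⟨p, hp, hps⟩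
      by_contra hlt
      exact hnd ⟨by omega, p, hp, by simpa using hps⟩
    congr 1
    rw [List.foldl_filter]
    exact PySem.List.foldl_congr_mem _ _ _ _ (fun chunks para _ => pv_step_eq cs hcs chunks para)

theorem chunk_text_generic_changed : Claim_changed_chunk_text_generic := by
  unfold Claim_changed_chunk_text_generic; decide
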